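-- pv_equiv track=rewrite | github.com/DancingOnAir/LeetcodePythonSolution | array/2373_largest_local_values_in_a_matrix.py | largestLocal1
-- ===== SOURCE A (Python) =====
-- from typing import List
--
-- def largestLocal1(grid: List[List[int]]) -> List[List[int]]:
--     tmp = list()
--     for row in grid:
--         tmp.append([max(row[i:i + 3]) for i in range(len(row) - 2)])
--
--     res = list()
--     for col in zip(*tmp):
--         res.append([max(col[i:i + 3]) for i in range(len(col) - 2)])
--
--     return [[*col] for col in zip(*res)]
-- ===== SOURCE B (Python) =====
-- def largestLocal1(grid):
--     # Direct 3x3 window scan: no intermediate row-reduced matrix, no transposes.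
--     n = len(grid)
--     if n < 3:
--         return []
--     w = min(len(row) for row in grid)
--     if w < 3:
--         return []
--     return [[max(grid[i + di][j + dj] for di in range(3) for dj in range(3))
--              for j in range(w - 2)]
--             for i in range(n - 2)]
-- ===== Notes on version B (the rewrite author's own statement) =====
-- stated objective: simpler
-- what changed: Replaced the separable two-pass scheme (row-wise 1x3 maxima, transpose via zip, column-wise 1x3 maxima, transpose back) by a single direct scan that takes the max over each full 3x3 window of the input, with explicit guards for fewer than 3 rows or a row shorter than 3.
import Mathlib
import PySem

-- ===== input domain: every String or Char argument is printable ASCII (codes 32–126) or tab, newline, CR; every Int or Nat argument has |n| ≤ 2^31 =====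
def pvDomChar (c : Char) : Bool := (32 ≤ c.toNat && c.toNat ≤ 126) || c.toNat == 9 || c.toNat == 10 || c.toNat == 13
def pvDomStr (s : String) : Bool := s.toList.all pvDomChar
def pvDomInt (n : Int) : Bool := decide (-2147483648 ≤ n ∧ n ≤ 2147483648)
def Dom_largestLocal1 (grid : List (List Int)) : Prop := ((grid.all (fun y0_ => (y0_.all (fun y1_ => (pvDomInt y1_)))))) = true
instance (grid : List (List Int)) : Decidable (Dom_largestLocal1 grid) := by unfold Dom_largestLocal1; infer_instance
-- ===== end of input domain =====

-- B replaces A's two separable passes with transposes by one direct 3x3-window scan (same asymptotic cost, simpler).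

-- ===== PORT A =====
-- max(xs) for a nonempty xs (Python max raises on []; every call below passes a nonempty slice, so the default 0 is unreachable)
def pymax (xs : List Int) : Int := (PySem.List.max? xs (fun y => y)).getD 0

-- zip(*xss) (as lists): truncates to the shortest row; every index j is < each row's length, so getD's default is unreachable
def zipStar (xss : List (List Int)) : List (List Int) :=
  match xss with
  | [] => []
  | x :: xs =>
    let m := xs.foldl (fun acc l => min acc l.length) x.length
    (List.range m).map (fun j => (x :: xs).map (fun l => l.getD j 0))

-- [max(row[i:i+3]) for i in range(len(row) - 2)]  (A applies this same comprehension to rows and to columns)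
def winRow (row : List Int) : List Int :=
  (PySem.List.pyRange 0 ((row.length : Int) - 2) 1).map
    (fun i => pymax (PySem.List.slice row (some i) (some (i + 3))))

def largestLocal1 (grid : List (List Int)) : List (List Int) :=
  let tmp := grid.map winRow
  let res := (zipStar tmp).map winRow
  (zipStar res).map (fun col => col)

-- ===== PORT B =====
def largestLocal1_alt (grid : List (List Int)) : List (List Int) :=
  let n := grid.length
  if n < 3 then []
  else
    -- w = min(len(row) for row in grid); grid is nonempty here, so the [] branch is unreachable
    let w := match grid.map List.length with
             | [] => 0
             | l :: ls => ls.foldl min l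
    if w < 3 then []
    else
      (List.range (n - 2)).map (fun i =>
        (List.range (w - 2)).map (fun j =>
          pymax ((List.range 3).flatMap (fun di =>
            (List.range 3).map (fun dj =>
              (grid.getD (i + di) []).getD (j + dj) 0)))))

-- ===== PRECONDITION & SPEC =====
def Spec_largestLocal1 (grid : List (List Int)) (out : List (List Int)) : Prop := out = largestLocal1_alt grid
instance (grid : List (List Int)) (out : List (List Int)) : Decidable (Spec_largestLocal1 grid out) := by unfold Spec_largestLocal1; infer_instance

-- ===== CLAIM (what is proved, stated in full; the proofs are below) =====
def Claim_equal_largestLocal1 : Prop := ∀ (grid : List (List Int)), Dom_largestLocal1 grid → Spec_largestLocal1 grid (largestLocal1 grid)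

-- ===== LEMMAS AND PROOFS =====

def minLen (xss : List (List Int)) : Nat :=
  match xss with
  | [] => 0
  | x :: xs => xs.foldl (fun acc l => min acc l.length) x.length

lemma zipStar_eq (xss : List (List Int)) (h : xss ≠ []) :
    zipStar xss = (List.range (minLen xss)).map (fun j => xss.map (fun l => l.getD j 0)) := by
  cases xss with
  | nil => exact absurd rfl h
  | cons x xs => rfl

lemma foldl_min_le (xs : List (List Int)) (a : Nat) :
    xs.foldl (fun acc l => min acc l.length) a ≤ a ∧
    ∀ l ∈ xs, xs.foldl (fun acc l => min acc l.length) a ≤ l.length := by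
  induction xs generalizing a with
  | nil => simp
  | cons y ys ih =>
    refine ⟨le_trans (ih (min a y.length)).1 (by omega), ?_⟩
    intro l hl
    rcases List.mem_cons.mp hl with rfl | h
    · exact le_trans (ih (min a l.length)).1 (by omega)
    · exact (ih (min a y.length)).2 l h

lemma minLen_le (xss : List (List Int)) (l : List Int) (hl : l ∈ xss) : minLen xss ≤ l.length := by
  cases xss with
  | nil => simp at hl
  | cons x xs =>
    rcases List.mem_cons.mp hl with rfl | h
    · exact (foldl_min_le xs l.length).1
    · exact (foldl_min_le xs x.length).2 l h

lemma winRow_length (row : List Int) : (winRow row).length = row.length - 2 := by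
  simp [winRow, PySem.List.pyRange_one]
  omega

lemma pymax_cons (x : Int) (t : List Int) : pymax (x :: t) = t.foldl max x := by
  simp [pymax, PySem.List.max?_id_cons]

lemma winRow_getElem (row : List Int) (j : Nat) (h : j + 3 ≤ row.length) :
    (winRow row)[j]'(by rw [winRow_length]; omega) =
      max (max (row[j]'(by omega)) (row[j+1]'(by omega))) (row[j+2]'(by omega)) := by
  have hw : (winRow row)[j]'(by rw [winRow_length]; omega) =
      pymax (PySem.List.slice row (some ((j : Int))) (some ((j : Int) + 3))) := by
    simp [winRow, PySem.List.pyRange_one]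
  rw [hw]
  have h3 : ((j : Int)) + 3 = (((j + 3 : Nat) : Int)) := by push_cast; ring
  rw [h3, PySem.List.slice_natCast]
  have ht : (row.drop j).take ((j + 3) - j) =
      [row[j]'(by omega), row[j+1]'(by omega), row[j+2]'(by omega)] := by
    apply List.ext_getElem
    · simp; omega
    · intro i h1 h2
      simp only [List.getElem_take, List.getElem_drop]
      simp at h2
      interval_cases i <;> simp
  rw [ht, pymax_cons]
  simp [List.foldl]

lemma minLen_map_winRow (xss : List (List Int)) (h : xss ≠ []) :
    minLen (xss.map winRow) = minLen xss - 2 := by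
  cases xss with
  | nil => exact absurd rfl h
  | cons x xs =>
    simp only [minLen, List.map_cons, List.foldl_map, winRow_length]
    have key : ∀ (ys : List (List Int)) (a : Nat),
        ys.foldl (fun acc l => min acc (l.length - 2)) (a - 2) =
          ys.foldl (fun acc l => min acc l.length) a - 2 := by
      intro ys
      induction ys with
      | nil => simp
      | cons y t ih =>
        intro a
        simp only [List.foldl_cons]
        rw [show min (a - 2) (y.length - 2) = min a y.length - 2 by omega, ih]
    exact key xs x.length

lemma foldl_min_const (xs : List (List Int)) (c : Nat) (h : ∀ l ∈ xs, l.length = c) :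
    xs.foldl (fun acc l => min acc l.length) c = c := by
  induction xs with
  | nil => rfl
  | cons y t ih =>
    simp only [List.foldl_cons]
    rw [h y (by simp), min_self]
    exact ih (fun l hl => h l (by simp [hl]))

lemma minLen_const (xss : List (List Int)) (c : Nat) (h : xss ≠ []) (hc : ∀ l ∈ xss, l.length = c) :
    minLen xss = c := by
  cases xss with
  | nil => exact absurd rfl h
  | cons x xs =>
    simp only [minLen]
    rw [hc x (by simp)]
    exact foldl_min_const xs c (fun l hl => hc l (by simp [hl]))

lemma alt_eq (r : List Int) (rs : List (List Int)) :
    largestLocal1_alt (r :: rs) =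
      if (r :: rs).length < 3 then []
      else if minLen (r :: rs) < 3 then []
      else (List.range ((r :: rs).length - 2)).map (fun i =>
        (List.range (minLen (r :: rs) - 2)).map (fun j =>
          pymax ((List.range 3).flatMap (fun di =>
            (List.range 3).map (fun dj =>
              ((r :: rs).getD (i + di) []).getD (j + dj) 0))))) := by
  simp only [largestLocal1_alt, List.map_cons, List.foldl_map, minLen]

theorem main_eq (grid : List (List Int)) : largestLocal1 grid = largestLocal1_alt grid := by
  cases grid with
  | nil => rfl
  | cons r rs =>
    set g : List (List Int) := r :: rs with hg
    have hgne : g ≠ [] := by simp [hg]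
    set n : Nat := g.length with hn
    set W : Nat := minLen g with hW
    have hWle : ∀ l ∈ g, W ≤ l.length := fun l hl => minLen_le g l hl
    have hBw : largestLocal1_alt g =
        if n < 3 then []
        else if W < 3 then []
        else (List.range (n - 2)).map (fun i =>
          (List.range (W - 2)).map (fun j =>
            pymax ((List.range 3).flatMap (fun di =>
              (List.range 3).map (fun dj =>
                (g.getD (i + di) []).getD (j + dj) 0))))) := alt_eq r rs
    -- tmp and its zipStar
    have htmpne : g.map winRow ≠ [] := by simp [hg]
    have hminTmp : minLen (g.map winRow) = W - 2 := minLen_map_winRow g hgne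
    have hcols : zipStar (g.map winRow) =
        (List.range (W - 2)).map (fun j => (g.map winRow).map (fun l => l.getD j 0)) := by
      rw [zipStar_eq _ htmpne, hminTmp]
    by_cases hW3 : W < 3
    · -- W - 2 = 0 : columns list empty on the A side, guard on the B side
      have h0 : W - 2 = 0 := by omega
      have hA : largestLocal1 g = [] := by
        show (zipStar ((zipStar (g.map winRow)).map winRow)).map (fun col => col) = []
        rw [hcols, h0]
        simp [zipStar]
      rw [hA, hBw]
      split_ifs <;> rfl
    · -- W ≥ 3
      have hcolslen : ∀ col ∈ zipStar (g.map winRow), col.length = n := by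
        intro col hcol
        rw [hcols] at hcol
        simp at hcol
        obtain ⟨j, _, rfl⟩ := hcol
        simp [hn]
      by_cases hn3 : n < 3
      · -- fewer than 3 rows: every res row is empty, zipStar of it is []
        have hres : ∀ row ∈ (zipStar (g.map winRow)).map winRow, row.length = 0 := by
          intro row hrow
          simp at hrow
          obtain ⟨col, hcol, rfl⟩ := hrow
          rw [winRow_length, hcolslen col hcol]
          omega
        have hA : largestLocal1 g = [] := by
          show (zipStar ((zipStar (g.map winRow)).map winRow)).map (fun col => col) = []
          rcases hcase : (zipStar (g.map winRow)).map winRow with _ | ⟨h0, t0⟩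
          · simp [zipStar]
          · rw [zipStar_eq _ (by simp)]
            have hm : minLen (h0 :: t0) = 0 := by
              apply minLen_const _ _ (by simp)
              intro l hl
              exact hres l (by rw [hcase]; exact hl)
            rw [hm]
            simp
        rw [hA, hBw]
        simp [hn3]
      · -- main case: n ≥ 3 and W ≥ 3
        have hcols2 : zipStar (g.map winRow) =
            (List.range (W - 2)).map (fun j => g.map (fun l => (winRow l).getD j 0)) := by
          rw [hcols]
          simp only [List.map_map, Function.comp_def]
        have hresne : (zipStar (g.map winRow)).map winRow ≠ [] := by
          rw [hcols2]
          simp only [ne_eq, List.map_eq_nil_iff, List.range_eq_nil]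
          omega
        have hminRes : minLen ((zipStar (g.map winRow)).map winRow) = n - 2 := by
          apply minLen_const _ _ hresne
          intro l hl
          simp at hl
          obtain ⟨col, hcol, rfl⟩ := hl
          rw [winRow_length, hcolslen col hcol]
        have hA : largestLocal1 g =
            (List.range (n - 2)).map (fun i =>
              ((zipStar (g.map winRow)).map winRow).map (fun l => l.getD i 0)) := by
          show (zipStar ((zipStar (g.map winRow)).map winRow)).map (fun col => col) = _
          rw [zipStar_eq _ hresne, hminRes]
          simp
        rw [hA, hBw]
        simp only [if_neg hn3, if_neg hW3]
        apply List.map_congr_left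
        intro i hi
        simp only [List.mem_range] at hi
        rw [hcols2, List.map_map, List.map_map]
        simp only [Function.comp_def]
        apply List.map_congr_left
        intro j hj
        simp only [List.mem_range] at hj
        have hrowlen : ∀ k (hk : k < n), W ≤ (g[k]'(by rw [hn] at hk; exact hk)).length := by
          intro k hk
          exact hWle _ (List.getElem_mem _)
        have hcollen : (g.map (fun l => (winRow l).getD j 0)).length = n := by simp [hn]
        -- the column entries, as getElem's of g
        have hcolentry : ∀ k (hk : k < n),
            (g.map (fun l => (winRow l).getD j 0))[k]'(by rw [hcollen]; exact hk) =
              max (max ((g[k]'(by rw [hn] at hk; exact hk))[j]'(by have := hrowlen k hk; omega))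
                       ((g[k]'(by rw [hn] at hk; exact hk))[j+1]'(by have := hrowlen k hk; omega)))
                  ((g[k]'(by rw [hn] at hk; exact hk))[j+2]'(by have := hrowlen k hk; omega)) := by
          intro k hk
          simp only [List.getElem_map]
          rw [List.getD_eq_getElem _ _ (by rw [winRow_length]; have := hrowlen k hk; omega)]
          exact winRow_getElem _ j (by have := hrowlen k hk; omega)
        -- LHS: window of the j-th column
        rw [List.getD_eq_getElem _ _ (by rw [winRow_length, hcollen]; omega)]
        rw [winRow_getElem _ i (by rw [hcollen]; omega)]
        rw [hcolentry i (by omega), hcolentry (i+1) (by omega), hcolentry (i+2) (by omega)]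
        -- RHS: expand the 3x3 flatMap and the getD's
        have hgd : ∀ k (hk : k < n) (c : Nat) (hc : c < W),
            (g.getD k []).getD c 0 = (g[k]'(by rw [hn] at hk; exact hk))[c]'(by
              have := hrowlen k hk; omega) := by
          intro k hk c hc
          have hk' : k < g.length := by rw [hn] at hk; exact hk
          have h1 : (g.getD k []) = g[k]'hk' := List.getD_eq_getElem _ _ hk'
          rw [h1, List.getD_eq_getElem _ _ (by have := hrowlen k hk; omega)]
        have hr3 : List.range 3 = [0, 1, 2] := by decide
        simp only [hr3, List.flatMap_cons, List.map_cons, List.map_nil, List.flatMap_nil,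
          List.append_nil, List.cons_append, List.nil_append]
        rw [pymax_cons]
        simp only [List.foldl_cons, List.foldl_nil, Nat.add_zero]
        rw [hgd i (by omega) j (by omega), hgd i (by omega) (j+1) (by omega),
            hgd i (by omega) (j+2) (by omega),
            hgd (i+1) (by omega) j (by omega), hgd (i+1) (by omega) (j+1) (by omega),
            hgd (i+1) (by omega) (j+2) (by omega),
            hgd (i+2) (by omega) j (by omega), hgd (i+2) (by omega) (j+1) (by omega),
            hgd (i+2) (by omega) (j+2) (by omega)]
        simp [max_assoc]

-- ===== VERDICT (by name: the statement is the Claim_ definition above) =====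
theorem largestLocal1_spec : Claim_equal_largestLocal1 := by
  intro grid _
  unfold Spec_largestLocal1
  exact main_eq grid
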